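-- pv_equiv track=rewrite | github.com/jacobvsdanniel/pubmedkb_core | model_dir/ner/main.py | get_character_position
-- ===== SOURCE A (Python) =====
-- def get_character_position(sentence, token_list, ti, tj):
--     no_space_prefix = "".join(token_list[:ti])
--     first_name = token_list[ti]
--     no_space_name = "".join(token_list[ti:tj])
--     ci = len(no_space_prefix) - 1
--
--     while True:
--         ci = sentence.find(first_name, ci + 1)
--         if ci == -1:
--             break
--
--         cj = ci
--         offset = 0
--
--         while cj < len(sentence) and offset < len(no_space_name):
--             if sentence[cj] == " ":
--                 cj += 1
--             elif sentence[cj] == no_space_name[offset]: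
--                 cj += 1
--                 offset += 1
--             else:
--                 break
--
--         if offset == len(no_space_name):
--             return ci, cj
--
--     return -1, -1
-- ===== SOURCE B (Python) =====
-- import re
--
-- def get_character_position(sentence, token_list, ti, tj):
--     first = token_list[ti]
--     name = "".join(token_list[ti:tj])
--     if " " in name:
--         return -1, -1
--     pos = len("".join(token_list[:ti]))
--     if pos > len(sentence):
--         return -1, -1
--     pattern = "(?=" + re.escape(first) + ")" + "".join(" *" + re.escape(ch) for ch in name)
--     m = re.compile(pattern).search(sentence, pos)
--     if m:
--         return m.start(), m.end()
--     return -1, -1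
-- ===== Notes on version B (the rewrite author's own statement) =====
-- stated objective: idiomatic
-- what changed: A's hand-rolled restart loop (str.find for the first token, then a char-by-char space-skipping while loop, retried at each find occurrence) is replaced by a single regex leftmost search: a lookahead anchors the first token and the pattern interleaves ' *' before each character, with an up-front guard returning (-1,-1) when the joined tokens contain a space (A can never match then) or the token prefix is longer than the sentence (str.find past the end).
import Mathlib
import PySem

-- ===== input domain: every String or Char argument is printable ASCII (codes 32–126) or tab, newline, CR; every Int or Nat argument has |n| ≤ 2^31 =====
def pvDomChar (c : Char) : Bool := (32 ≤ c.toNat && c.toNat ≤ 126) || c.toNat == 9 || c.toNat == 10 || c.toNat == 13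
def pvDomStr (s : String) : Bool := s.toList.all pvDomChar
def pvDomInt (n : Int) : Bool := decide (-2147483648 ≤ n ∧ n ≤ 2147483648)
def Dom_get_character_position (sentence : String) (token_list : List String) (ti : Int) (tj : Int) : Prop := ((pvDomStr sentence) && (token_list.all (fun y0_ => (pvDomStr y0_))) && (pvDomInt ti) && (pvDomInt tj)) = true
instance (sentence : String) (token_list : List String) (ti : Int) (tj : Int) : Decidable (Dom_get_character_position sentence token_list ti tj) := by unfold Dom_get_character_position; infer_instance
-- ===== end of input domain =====

-- B replaces A's repeated str.find restart loop by a single regex-style leftmost search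
-- (lookahead for the first token, then ' *'-separated characters) with an up-front
-- space guard; objective: idiomatic (in Python the scan runs inside the C regex engine).

-- ===== PORT A =====

-- A's inner while loop: state (cj, offset), branches in A's order.
def pvInnerA (s name : List Char) (cj off : Nat) : Nat × Nat :=
  if h : cj < s.length ∧ off < name.length then
    if s[cj]'h.1 = ' ' then pvInnerA s name (cj + 1) off
    else if s[cj]'h.1 = name[off]'h.2 then pvInnerA s name (cj + 1) (off + 1)
    else (cj, off)
  else (cj, off)
termination_by (s.length - cj) + (name.length - off)
decreasing_by all_goals omega

-- A's outer `while True` loop; ci strictly increases on each find, so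
-- s.length + 2 fuel steps are never exhausted (the fuel only makes it total).
def pvLoopA (s first name : List Char) (ci : Int) : Nat → Int × Int
  | 0 => (-1, -1)
  | fuel + 1 =>
    let ci' := PySem.Chars.findFrom s first (ci + 1) none
    if ci' = -1 then (-1, -1)
    else
      let r := pvInnerA s name ci'.toNat 0
      if r.2 = name.length then (ci', (r.1 : Int))
      else pvLoopA s first name ci' fuel

def get_character_position (sentence : String) (token_list : List String) (ti : Int) (tj : Int) : Int × Int :=
  let no_space_prefix := PySem.Str.join "" (PySem.List.slice token_list none (some ti))
  let first_name := PySem.List.pyGetD token_list ti ""   -- token_list[ti]; total under Pre_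
  let no_space_name := PySem.Str.join "" (PySem.List.slice token_list (some ti) (some tj))
  let ci : Int := (no_space_prefix.toList.length : Int) - 1
  pvLoopA sentence.toList first_name.toList no_space_name.toList ci (sentence.toList.length + 2)

-- ===== PORT B =====
-- Source B's regex `(?=first)(' *'c)*` has no regex counterpart in Lean, so its matching
-- semantics is ported by hand, step for step; it is exact for this pattern family:
-- the pattern is a fixed concatenation of a zero-width literal lookahead and groups
-- ' *'+c with c a literal non-space char (guard), so matching is deterministic
-- (maximal space run, then the forced character) and `search` is the leftmost
-- position ≥ pos at which this matches.

-- ' *' : consume the maximal run of spaces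
def pvSkipSp (s : List Char) (cj : Nat) : Nat :=
  if h : cj < s.length then
    if s[cj] = ' ' then pvSkipSp s (cj + 1) else cj
  else cj
termination_by s.length - cj
decreasing_by omega

-- the tail of the pattern: for each character c of name, ' *' then c
def pvMatchB (s : List Char) (cj : Nat) : List Char → Option Nat
  | [] => some cj
  | c :: rest =>
    let k := pvSkipSp s cj
    if h : k < s.length then
      if s[k]'h = c then pvMatchB s (k + 1) rest else none
    else none

-- re.search: leftmost match position ≥ pos (lookahead = prefix test, no consumption)
def pvSearchB (s first name : List Char) (pos : Nat) : Option (Nat × Nat) :=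
  if pos ≤ s.length then
    if first.isPrefixOf (s.drop pos) then
      match pvMatchB s pos name with
      | some e => some (pos, e)
      | none => pvSearchB s first name (pos + 1)
    else pvSearchB s first name (pos + 1)
  else none
termination_by s.length + 1 - pos
decreasing_by all_goals omega

def get_character_position_alt (sentence : String) (token_list : List String) (ti : Int) (tj : Int) : Int × Int :=
  let first := PySem.List.pyGetD token_list ti ""
  let name := PySem.Str.join "" (PySem.List.slice token_list (some ti) (some tj))
  if PySem.Str.isIn " " name then (-1, -1)
  else
    let pos := (PySem.Str.join "" (PySem.List.slice token_list none (some ti))).toList.length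
    if sentence.toList.length < pos then (-1, -1)
    else
      match pvSearchB sentence.toList first.toList name.toList pos with
      | some (a, b) => ((a : Int), (b : Int))
      | none => (-1, -1)

-- ===== PRECONDITION & SPEC =====
-- Pre_ excludes exactly the inputs where Python A raises: token_list[ti] is an
-- IndexError unless ti is a valid (possibly negative) Python index.
def Pre_get_character_position (sentence : String) (token_list : List String) (ti : Int) (tj : Int) : Prop :=
  PySem.Raise.InRange token_list.length ti
instance (sentence : String) (token_list : List String) (ti : Int) (tj : Int) : Decidable (Pre_get_character_position sentence token_list ti tj) := by unfold Pre_get_character_position; infer_instance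

def pvWitness_get_character_position : String × List String × Int × Int := ("a b", ["a", "b"], 0, 2)

def Spec_get_character_position (sentence : String) (token_list : List String) (ti : Int) (tj : Int) (out : Int × Int) : Prop := out = get_character_position_alt sentence token_list ti tj
instance (sentence : String) (token_list : List String) (ti : Int) (tj : Int) (out : Int × Int) : Decidable (Spec_get_character_position sentence token_list ti tj out) := by unfold Spec_get_character_position; infer_instance

-- ===== CLAIM (what is proved, stated in full; the proofs are below) =====
def Claim_equal_get_character_position : Prop := ∀ (sentence : String) (token_list : List String) (ti : Int) (tj : Int), Dom_get_character_position sentence token_list ti tj → Pre_get_character_position sentence token_list ti tj → Spec_get_character_position sentence token_list ti tj (get_character_position sentence token_list ti tj)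

-- ===== LEMMAS AND PROOFS =====

theorem pvSkipSp_stop (s : List Char) (cj : Nat) (h : pvSkipSp s cj < s.length) :
    s[pvSkipSp s cj] ≠ ' ' := by
  fun_induction pvSkipSp s cj with
  | case1 cj h1 h2 ih => exact ih h
  | case2 cj h1 h2 => simpa [pvSkipSp, h1, h2] using h2
  | case3 cj h1 => omega

theorem pvSkipSp_of_space (s : List Char) (cj : Nat) (h : cj < s.length) (hs : s[cj] = ' ') :
    pvSkipSp s cj = pvSkipSp s (cj + 1) := by
  conv_lhs => rw [pvSkipSp]
  simp [h, hs]

theorem pvSkipSp_of_stop (s : List Char) (cj : Nat)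
    (h : ∀ (hlt : cj < s.length), s[cj] ≠ ' ') : pvSkipSp s cj = cj := by
  rw [pvSkipSp]
  by_cases h1 : cj < s.length
  · simp [h1, h h1]
  · simp [h1]

theorem pvMatchB_cons_space (s : List Char) (cj : Nat) (c : Char) (rest : List Char)
    (h : cj < s.length) (hs : s[cj] = ' ') :
    pvMatchB s cj (c :: rest) = pvMatchB s (cj + 1) (c :: rest) := by
  simp only [pvMatchB]
  rw [pvSkipSp_of_space s cj h hs]

-- matcher agreement: A's inner loop ends with offset = name.length exactly when
-- B's pattern tail matches, with the same end position
theorem pvInnerA_of_match (s name : List Char) (cj off : Nat) (e : Nat)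
    (hoff : off ≤ name.length) (hm : pvMatchB s cj (name.drop off) = some e) :
    pvInnerA s name cj off = (e, name.length) := by
  fun_induction pvInnerA s name cj off with
  | case1 cj off h h1 ih =>
    -- s[cj] = ' ' : A skips; B's matcher is invariant under the skip
    have hd : name.drop off = name[off]'h.2 :: name.drop (off + 1) :=
      List.drop_eq_getElem_cons h.2
    rw [hd, pvMatchB_cons_space s cj _ _ h.1 h1, ← hd] at hm
    exact ih hoff hm
  | case2 cj off h h1 h2 ih =>
    -- s[cj] = name[off] ≠ ' '
    have hd : name.drop off = name[off]'h.2 :: name.drop (off + 1) :=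
      List.drop_eq_getElem_cons h.2
    rw [hd] at hm
    have hk : pvSkipSp s cj = cj := pvSkipSp_of_stop s cj (fun _ => by simp [h1])
    simp only [pvMatchB, hk] at hm
    rw [dif_pos h.1] at hm
    rw [if_pos h2] at hm
    exact ih (by omega) hm
  | case3 cj off h h1 h2 =>
    exfalso
    have hd : name.drop off = name[off]'h.2 :: name.drop (off + 1) :=
      List.drop_eq_getElem_cons h.2
    rw [hd] at hm
    have hk : pvSkipSp s cj = cj := pvSkipSp_of_stop s cj (fun _ => by simp [h1])
    simp only [pvMatchB, hk] at hm
    rw [dif_pos h.1] at hm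
    rw [if_neg h2] at hm
    simp at hm
  | case4 cj off h =>
    rcases Nat.lt_or_ge off name.length with hlt | hge
    · -- then cj ≥ s.length : the matcher fails, contradiction
      exfalso
      have hd : name.drop off = name[off]'hlt :: name.drop (off + 1) :=
        List.drop_eq_getElem_cons hlt
      have hcj : ¬ cj < s.length := fun hc => h ⟨hc, hlt⟩
      have hk : pvSkipSp s cj = cj := pvSkipSp_of_stop s cj (fun hc => absurd hc hcj)
      rw [hd] at hm
      simp only [pvMatchB, hk] at hm
      rw [dif_neg hcj] at hm
      simp at hm
    · have hoff' : off = name.length := by omega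
      subst hoff'
      simp only [List.drop_length, pvMatchB] at hm
      simp [Option.some_inj.mp hm]

theorem pvInnerA_of_nomatch (s name : List Char) (cj off : Nat)
    (hoff : off ≤ name.length) (hm : pvMatchB s cj (name.drop off) = none) :
    (pvInnerA s name cj off).2 ≠ name.length := by
  fun_induction pvInnerA s name cj off with
  | case1 cj off h h1 ih =>
    have hd : name.drop off = name[off]'h.2 :: name.drop (off + 1) :=
      List.drop_eq_getElem_cons h.2
    rw [hd, pvMatchB_cons_space s cj _ _ h.1 h1, ← hd] at hm
    exact ih hoff hm
  | case2 cj off h h1 h2 ih =>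
    have hd : name.drop off = name[off]'h.2 :: name.drop (off + 1) :=
      List.drop_eq_getElem_cons h.2
    have hk : pvSkipSp s cj = cj := pvSkipSp_of_stop s cj (fun _ => by simp [h1])
    rw [hd] at hm
    simp only [pvMatchB, hk] at hm
    rw [dif_pos h.1, if_pos h2] at hm
    exact ih (by omega) hm
  | case3 cj off h h1 h2 =>
    simp only []
    omega
  | case4 cj off h =>
    rcases Nat.lt_or_ge off name.length with hlt | hge
    · simp only []
      omega
    · exfalso
      have hoff' : off = name.length := by omega
      subst hoff'
      simp [List.drop_length, pvMatchB] at hm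

theorem pvMatchB_none_of_space (s : List Char) (l : List Char) (hl : ' ' ∈ l) :
    ∀ cj, pvMatchB s cj l = none := by
  induction l with
  | nil => cases hl
  | cons c rest ih =>
    intro cj
    simp only [pvMatchB]
    by_cases hk : pvSkipSp s cj < s.length
    · rw [dif_pos hk]
      by_cases hc : s[pvSkipSp s cj] = c
      · rw [if_pos hc]
        have hcne : c ≠ ' ' := by
          intro h'; exact pvSkipSp_stop s cj hk (hc.trans h')
        have : ' ' ∈ rest := by
          rcases List.mem_cons.mp hl with h' | h'
          · exact absurd h'.symm hcne
          · exact h'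
        exact ih this _
      · rw [if_neg hc]
    · rw [dif_neg hk]

theorem pvSearchB_none_of_matchnone (s first name : List Char)
    (h : ∀ p, pvMatchB s p name = none) : ∀ pos, pvSearchB s first name pos = none := by
  intro pos
  fun_induction pvSearchB s first name pos with
  | case1 pos hle hpre e hme => rw [h pos] at hme; cases hme
  | case2 pos hle hpre hme ih => exact ih
  | case3 pos hle hpre ih => exact ih
  | case4 pos hle => rfl

theorem pvSearchB_none_of_noprefix (s first name : List Char) (pos : Nat)
    (h : ∀ p, pos ≤ p → ¬ first <+: s.drop p) : pvSearchB s first name pos = none := by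
  fun_induction pvSearchB s first name pos with
  | case1 pos hle hpre e hme =>
    exact absurd (List.isPrefixOf_iff_prefix.mp hpre) (h pos le_rfl)
  | case2 pos hle hpre hme ih =>
    exact absurd (List.isPrefixOf_iff_prefix.mp hpre) (h pos le_rfl)
  | case3 pos hle hpre ih => exact ih (fun p hp => h p (by omega))
  | case4 pos hle => rfl

theorem pvSearchB_skip (s first name : List Char) (m : Nat) :
    ∀ pos, pos ≤ m → m ≤ s.length → (∀ p, pos ≤ p → p < m → ¬ first <+: s.drop p) →
    pvSearchB s first name pos = pvSearchB s first name m := by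
  intro pos
  induction hd : m - pos generalizing pos with
  | zero =>
    intro h1 _ _
    congr 1
    omega
  | succ n ih =>
    intro h1 h2 h3
    have hpos : pos < m := by omega
    have hnp : ¬ first.isPrefixOf (s.drop pos) := by
      intro hp
      exact h3 pos le_rfl hpos (List.isPrefixOf_iff_prefix.mp hp)
    rw [pvSearchB, if_pos (by omega : pos ≤ s.length), if_neg hnp]
    exact ih (pos + 1) (by omega) (by omega) h2 (fun p hp hpm => h3 p (by omega) hpm)

theorem pvFindFrom_past (s first : List Char) (start : Int) (h : (s.length : Int) < start) :
    PySem.Chars.findFrom s first start none = -1 := by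
  have h0 : ¬ start < 0 := by omega
  simp only [PySem.Chars.findFrom, h0, if_false]
  rw [if_pos h]

theorem pvPrefix_infix (s first : List Char) (k p : Nat) (hk : k ≤ p)
    (h : first <+: s.drop p) : first <:+: s.drop k := by
  have hdd : s.drop p = (s.drop k).drop (p - k) := by
    rw [List.drop_drop]; congr 1; omega
  rw [hdd] at h
  exact h.isInfix.trans (List.drop_suffix _ _).isInfix

-- the main bridge: A's find-restart loop equals B's leftmost scan
theorem pvLoopA_eq_searchB (s first name : List Char) :
    ∀ (fuel : Nat) (ci : Int), -1 ≤ ci → (s.length : Int) + 1 - ci ≤ fuel → 1 ≤ fuel →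
    pvLoopA s first name ci fuel =
      (match pvSearchB s first name (ci + 1).toNat with
       | some (a, b) => ((a : Int), (b : Int))
       | none => (-1, -1)) := by
  intro fuel
  induction fuel with
  | zero => intro ci _ h2 h3; omega
  | succ n ih =>
    intro ci h1 h2 _
    by_cases hbig : (s.length : Int) < ci + 1
    · have hff := pvFindFrom_past s first (ci + 1) hbig
      have hpos : ¬ (ci + 1).toNat ≤ s.length := by omega
      rw [pvSearchB, if_neg hpos]
      simp only [pvLoopA, hff, if_pos]
    · have hle : ci + 1 ≤ (s.length : Int) := by omega
      have hcast : ci + 1 = (((ci + 1).toNat : Nat) : Int) := by omega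
      set k : Nat := (ci + 1).toNat with hk
      have hkle : k ≤ s.length := by omega
      simp only [pvLoopA]
      rw [hcast]
      by_cases hneg : PySem.Chars.findFrom s first (k : Int) none = -1
      · rw [if_pos hneg]
        have hni := (PySem.Chars.findFrom_natCast_eq_neg_one_iff s first k hkle).mp hneg
        rw [pvSearchB_none_of_noprefix s first name k
          (fun p hp hpre => hni (pvPrefix_infix s first k p hp hpre))]
      · rw [if_neg hneg]
        obtain ⟨hge, hpre, hmin⟩ := PySem.Chars.findFrom_natCast_spec s first k hkle hneg
        have hfle : PySem.Chars.findFrom s first (k : Int) none ≤ (s.length : Int) := by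
          rw [PySem.Chars.findFrom_natCast s first k hkle]
          split
          · omega
          · have h5 := PySem.Chars.find_le_length (List.drop k s) first
            have h6 : (List.drop k s).length = s.length - k := by simp
            omega
        set ff := PySem.Chars.findFrom s first (k : Int) none with hffdef
        have hm : ff = ((ff.toNat : Nat) : Int) := by omega
        set m : Nat := ff.toNat with hmdef
        have hkm : k ≤ m := by omega
        have hmle : m ≤ s.length := by omega
        rw [pvSearchB_skip s first name m k hkm hmle hmin]
        rw [pvSearchB, if_pos hmle, if_pos (List.isPrefixOf_iff_prefix.mpr hpre)]
        cases hmb : pvMatchB s m name with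
        | some e =>
          have hr := pvInnerA_of_match s name m 0 e (Nat.zero_le _)
            (by rw [List.drop_zero]; exact hmb)
          rw [hr, hm]
          simp
        | none =>
          have hr := pvInnerA_of_nomatch s name m 0 (Nat.zero_le _)
            (by rw [List.drop_zero]; exact hmb)
          rw [if_neg hr]
          have := ih ff (by omega) (by omega) (by omega)
          rw [this]
          have : (ff + 1).toNat = m + 1 := by omega
          rw [this]

-- ===== VERDICT (by name: the statement is the Claim_ definition above) =====
theorem get_character_position_spec : Claim_equal_get_character_position := by
  unfold Claim_equal_get_character_position
  intro sentence token_list ti tj _ _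
  unfold Spec_get_character_position get_character_position get_character_position_alt
  simp only []
  set s := sentence.toList with hs
  set firstS := PySem.List.pyGetD token_list ti "" with hfs
  set nameS := PySem.Str.join "" (PySem.List.slice token_list (some ti) (some tj)) with hns
  set plen := (PySem.Str.join "" (PySem.List.slice token_list none (some ti))).toList.length with hpl
  have hmain := pvLoopA_eq_searchB s firstS.toList nameS.toList (s.length + 2)
    ((plen : Int) - 1) (by omega) (by push_cast; omega) (by omega)
  have ht : ((plen : Int) - 1 + 1).toNat = plen := by omega
  rw [ht] at hmain
  rw [hmain]
  by_cases hsp : PySem.Str.isIn " " nameS = true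
  · rw [if_pos hsp]
    have hmem : ' ' ∈ nameS.toList := by
      have := (PySem.Str.isIn_iff_infix " " nameS).mp hsp
      exact (List.singleton_infix_iff ' ' nameS.toList).mp this
    rw [pvSearchB_none_of_matchnone s firstS.toList nameS.toList
      (pvMatchB_none_of_space s nameS.toList hmem) plen]
  · rw [if_neg hsp]
    by_cases hlen : s.length < plen
    · rw [if_pos hlen]
      have : pvSearchB s firstS.toList nameS.toList plen = none := by
        rw [pvSearchB, if_neg (by omega)]
      rw [this]
    · rw [if_neg hlen]
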